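-- pv_equiv track=rewrite | github.com/okumura2997/kaggle-deep-past-challenge-5th-place | src/preprocess.py | build_context_prefix
-- ===== SOURCE A (Python) =====
-- def build_context_prefix(ctx_parts: list[str], max_bytes: int) -> str:
--     """Build ``[context]...[/context] `` from ctx_parts (oldest-first order).
--
--     If *max_bytes* > 0 and the prefix exceeds it, drop oldest sentences first.
--     Returns empty string if no context remains.
--     """
--     if not ctx_parts:
--         return ""
--     _TAG_OVERHEAD = len("[context]  [/context] ".encode())
--     _SEP = " [sep] "
--     _SEP_BYTES = len(_SEP.encode())
--
--     if max_bytes > 0: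
--         while ctx_parts:
--             content_bytes = sum(len(p.encode()) for p in ctx_parts)
--             sep_bytes = _SEP_BYTES * (len(ctx_parts) - 1) if len(ctx_parts) > 1 else 0
--             total = _TAG_OVERHEAD + content_bytes + sep_bytes
--             if total <= max_bytes:
--                 break
--             ctx_parts.pop(0)
--
--     if not ctx_parts:
--         return ""
--     ctx = _SEP.join(ctx_parts)
--     return f"[context] {ctx} [/context] "
-- ===== SOURCE B (Python) =====
-- def build_context_prefix(ctx_parts: list[str], max_bytes: int) -> str:
--     """O(n): compute the total once, subtract dropped fronts incrementally.
--
--     Unlike A, does not mutate ctx_parts (return value is identical).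
--     """
--     if not ctx_parts:
--         return ""
--     n = len(ctx_parts)
--     total = 22 + sum(len(p.encode()) for p in ctx_parts) + 7 * (n - 1)
--     start = 0
--     if max_bytes > 0:
--         while start < n and total > max_bytes:
--             total -= len(ctx_parts[start].encode()) + (7 if start < n - 1 else 0)
--             start += 1
--         if start == n:
--             return ""
--     kept = ctx_parts[start:]
--     return f"[context] {' [sep] '.join(kept)} [/context] "
-- ===== Notes on version B (the rewrite author's own statement) =====
-- stated objective: faster
-- what changed: Replaces the pop-and-resum loop (which recomputes the full byte total after every drop) by a single precomputed total that is decremented incrementally while advancing a start index, then one slice+join; also avoids mutating the input list.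
import Mathlib
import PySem

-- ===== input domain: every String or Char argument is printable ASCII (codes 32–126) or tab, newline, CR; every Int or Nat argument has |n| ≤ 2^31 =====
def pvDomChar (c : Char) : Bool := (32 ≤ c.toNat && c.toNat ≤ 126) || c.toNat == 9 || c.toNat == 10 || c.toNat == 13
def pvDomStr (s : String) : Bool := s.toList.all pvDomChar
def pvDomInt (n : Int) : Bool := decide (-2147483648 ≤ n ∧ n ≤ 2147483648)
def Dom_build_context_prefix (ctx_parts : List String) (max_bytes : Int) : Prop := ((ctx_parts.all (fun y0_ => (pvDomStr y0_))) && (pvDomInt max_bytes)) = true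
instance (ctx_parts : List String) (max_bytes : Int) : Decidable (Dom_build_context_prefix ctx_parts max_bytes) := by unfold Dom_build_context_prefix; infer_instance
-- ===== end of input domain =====

-- B replaces A's pop-and-resum O(n^2) loop by one precomputed total decremented
-- incrementally (O(n)); A additionally mutates ctx_parts in place (pop(0)) while B
-- does not — the equivalence proved here is about the return value only.

-- ===== PORT A =====
-- sum(len(p.encode()) for p in ctx_parts); byte length = char count on the ASCII domain
def pvSumBytes (l : List String) : Int := (l.map (fun p => PySem.Str.len p)).sum

-- the 'while ctx_parts: … pop(0)' loop; recomputes the full total each iteration, as A does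
def pvADrop (max_bytes : Int) : List String → List String
  | [] => []
  | p :: rest =>
    let content_bytes := pvSumBytes (p :: rest)
    let sep_bytes : Int :=
      if (p :: rest).length > 1 then 7 * (((p :: rest).length : Int) - 1) else 0
    let total := 22 + content_bytes + sep_bytes
    if total ≤ max_bytes then p :: rest else pvADrop max_bytes rest

def build_context_prefix (ctx_parts : List String) (max_bytes : Int) : String :=
  if ctx_parts = [] then ""
  else
    let kept := if max_bytes > 0 then pvADrop max_bytes ctx_parts else ctx_parts
    if kept = [] then ""
    else "[context] " ++ PySem.Str.join " [sep] " kept ++ " [/context] "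

-- ===== PORT B =====
-- B's while loop: total is carried and decremented; the list tail is ctx_parts[start:]
def pvBDrop (max_bytes : Int) : List String → Int → List String
  | [], _ => []
  | p :: rest, total =>
    if total > max_bytes then
      pvBDrop max_bytes rest (total - PySem.Str.len p - (if rest.length > 0 then 7 else 0))
    else p :: rest

def build_context_prefix_alt (ctx_parts : List String) (max_bytes : Int) : String :=
  if ctx_parts = [] then ""
  else
    let total := 22 + pvSumBytes ctx_parts + 7 * ((ctx_parts.length : Int) - 1)
    let kept := if max_bytes > 0 then pvBDrop max_bytes ctx_parts total else ctx_parts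
    if kept = [] then ""
    else "[context] " ++ PySem.Str.join " [sep] " kept ++ " [/context] "

-- ===== PRECONDITION & SPEC =====
def Spec_build_context_prefix (ctx_parts : List String) (max_bytes : Int) (out : String) : Prop := out = build_context_prefix_alt ctx_parts max_bytes
instance (ctx_parts : List String) (max_bytes : Int) (out : String) : Decidable (Spec_build_context_prefix ctx_parts max_bytes out) := by unfold Spec_build_context_prefix; infer_instance

-- ===== CLAIM (what is proved, stated in full; the proofs are below) =====
def Claim_equal_build_context_prefix : Prop := ∀ (ctx_parts : List String) (max_bytes : Int), Dom_build_context_prefix ctx_parts max_bytes → Spec_build_context_prefix ctx_parts max_bytes (build_context_prefix ctx_parts max_bytes)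

-- ===== LEMMAS AND PROOFS =====

-- The incremental loop, started at the full total, coincides with A's resumming loop.
lemma pvBDrop_eq_pvADrop (mb : Int) :
    ∀ l : List String,
      pvBDrop mb l (22 + pvSumBytes l + 7 * ((l.length : Int) - 1)) = pvADrop mb l := by
  intro l
  induction l with
  | nil => simp [pvBDrop, pvADrop]
  | cons p rest ih =>
    simp only [pvBDrop, pvADrop]
    have hsum : pvSumBytes (p :: rest) = PySem.Str.len p + pvSumBytes rest := by
      simp [pvSumBytes]
    rcases rest with _ | ⟨q, rest'⟩
    · simp [pvBDrop, pvADrop, pvSumBytes]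
      split_ifs with h h' <;> first | rfl | omega
    · have hsep : (if (p :: q :: rest').length > 1
          then 7 * (((p :: q :: rest').length : Int) - 1) else 0)
          = 7 * (((p :: q :: rest').length : Int) - 1) := by
        simp
      rw [hsep]
      by_cases hle : 22 + pvSumBytes (p :: q :: rest')
          + 7 * (((p :: q :: rest').length : Int) - 1) ≤ mb
      · rw [if_neg (by omega), if_pos hle]
      · rw [if_pos (by omega), if_neg hle]
        have harg : 22 + pvSumBytes (p :: q :: rest')
            + 7 * (((p :: q :: rest').length : Int) - 1)
            - PySem.Str.len p - (if (q :: rest').length > 0 then 7 else 0)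
            = 22 + pvSumBytes (q :: rest') + 7 * (((q :: rest').length : Int) - 1) := by
          have : pvSumBytes (p :: q :: rest') = PySem.Str.len p + pvSumBytes (q :: rest') := by
            simp [pvSumBytes]
          simp only [List.length_cons] at *
          push_cast
          omega
        rw [harg, ih]

-- ===== VERDICT (by name: the statement is the Claim_ definition above) =====
theorem build_context_prefix_spec : Claim_equal_build_context_prefix := by
  intro ctx mb _
  unfold Spec_build_context_prefix build_context_prefix build_context_prefix_alt
  rcases ctx with _ | ⟨p, rest⟩
  · rfl
  · simp only [reduceCtorEq, if_false]
    rw [pvBDrop_eq_pvADrop]
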